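-- pv_equiv track=rewrite | github.com/siakhooi/codility-pairacoder-2022 | codility/solution2.py | solution
-- ===== SOURCE A (Python) =====
-- def solution(S):
--   N = len(S)
--   nxt = dict()
--   dp = [None] * (N+1)
--   dps = [None] * (N+1)
--   dp[N] = dps[N] = 0
--   for i in range(N-1, -1, -1):
--     dps[i] = N-i
--     if S[i] in nxt:
--       j = nxt[S[i]]
--       dps[i] = min(dp[j+1], dps[j])
--     dp[i] = min (1+dp[i+1], dps[i])
--     nxt[S[i]] = i
--
--   return dp[0]
-- ===== SOURCE B (Python) =====
-- def solution(S):
--     # Forward shortest-path relaxation: the answer is the distance from 0 to N in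
--     # the DAG with edges i->i+1 (cost 1) and i->j+1 (cost 0) for i<j, S[i]==S[j];
--     # a single forward pass keeps f = dist(0, j) and, per character c, the minimum
--     # of f over earlier occurrences of c.
--     N = len(S)
--     f = 0
--     g = {}
--     for j in range(N):
--         c = S[j]
--         if c in g:
--             v = g[c]
--             nf = min(f + 1, v)
--             g[c] = min(v, f)
--         else:
--             nf = f + 1
--             g[c] = f
--         f = nf
--     return f
-- ===== Notes on version B (the rewrite author's own statement) =====
-- stated objective: alternative
-- what changed: B reformulates the problem as a 0/1-weight shortest-path distance from the left end of the string and computes it in a single forward pass with one scalar and per-character running minima, instead of A's backward pass over dp/dps arrays chained through a next-occurrence dict; the proof shows A's dps chain is the backward distance and the two directions meet.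
import Mathlib
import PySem

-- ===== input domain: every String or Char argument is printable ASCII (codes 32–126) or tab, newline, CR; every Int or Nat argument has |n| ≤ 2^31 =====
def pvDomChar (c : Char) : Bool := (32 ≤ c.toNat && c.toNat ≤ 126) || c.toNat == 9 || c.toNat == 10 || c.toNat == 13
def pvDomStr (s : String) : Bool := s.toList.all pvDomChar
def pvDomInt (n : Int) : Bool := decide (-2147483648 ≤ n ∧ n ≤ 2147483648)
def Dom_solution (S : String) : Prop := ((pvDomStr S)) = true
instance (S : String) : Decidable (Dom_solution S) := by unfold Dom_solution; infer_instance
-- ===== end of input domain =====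

-- B recomputes A's answer as the 0/1-shortest-path distance from the left end,
-- by a single forward pass (per-character running minima) instead of A's backward
-- dp/dps arrays with next-occurrence chaining (alternative algorithm, same cost).

-- ===== PORT A =====
-- read of a dp/dps cell: on every read A performs, the index is in range and the cell
-- is already filled (not None), so the defaults are never used — exact.
def solGetI (xs : List (Option Int)) (i : Int) : Int :=
  (PySem.List.pyGetD xs i none).getD 0

-- one iteration of A's 'for i in range(N-1, -1, -1)' body, state (nxt, dp, dps)
def solStepA (S : String) (N : Int)
    (st : PySem.Dict Char Int × List (Option Int) × List (Option Int)) (i : Int) :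
    PySem.Dict Char Int × List (Option Int) × List (Option Int) :=
  match st with
  | (nxt, dp, dps) =>
    -- i is always in range of S, so the ' ' default is never used — exact
    let c := (PySem.Str.pyGet? S i).getD ' '
    let dps := PySem.List.pySetD dps i (some (N - i))
    let dps :=
      if nxt.contains c then
        -- key present (the branch guard), so the 0 default is never used — exact
        let j := nxt.getD c 0
        PySem.List.pySetD dps i (some (min (solGetI dp (j + 1)) (solGetI dps j)))
      else dps
    let dp := PySem.List.pySetD dp i (some (min (1 + solGetI dp (i + 1)) (solGetI dps i)))
    let nxt := nxt.insert c i
    (nxt, dp, dps)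

def solution (S : String) : Int :=
  let N : Int := PySem.Str.len S
  let dp0 := PySem.List.pySetD (PySem.List.pyRepeat [(none : Option Int)] (N + 1)) N (some 0)
  let dps0 := PySem.List.pySetD (PySem.List.pyRepeat [(none : Option Int)] (N + 1)) N (some 0)
  let st := (PySem.List.pyRange (N - 1) (-1) (-1)).foldl (solStepA S N)
    (PySem.Dict.empty, dp0, dps0)
  solGetI st.2.1 0

-- ===== PORT B =====
-- one iteration of B's forward loop, state (f, g)
def solStepB (S : String) (st : Int × PySem.Dict Char Int) (j : Int) :
    Int × PySem.Dict Char Int :=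
  match st with
  | (f, g) =>
    -- j is always in range of S, so the ' ' default is never used — exact
    let c := (PySem.Str.pyGet? S j).getD ' '
    if g.contains c then
      -- key present (the branch guard), so the 0 default is never used — exact
      let v := g.getD c 0
      (min (f + 1) v, g.insert c (min v f))
    else
      (f + 1, g.insert c f)

def solution_alt (S : String) : Int :=
  let N : Int := PySem.Str.len S
  ((PySem.List.pyRange 0 N 1).foldl (solStepB S) (0, PySem.Dict.empty)).1

-- ===== PRECONDITION & SPEC =====
def Spec_solution (S : String) (out : Int) : Prop := out = solution_alt S
instance (S : String) (out : Int) : Decidable (Spec_solution S out) := by unfold Spec_solution; infer_instance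

-- ===== CLAIM (what is proved, stated in full; the proofs are below) =====
def Claim_equal_solution : Prop := ∀ (S : String), Dom_solution S → Spec_solution S (solution S)

-- ===== LEMMAS AND PROOFS =====

-- Both programs compute the distance from node 0 to node N in the DAG on nodes
-- 0..N with edges i→i+1 of weight 1 and i→j+1 of weight 0 whenever i < j and
-- S[i] = S[j].  `Dd L i` is that distance from i to N (A computes Dd L 0 backward,
-- with `DSd` the value A's dps array holds); `Ff L n` is the distance from 0 to n
-- (B computes Ff L N forward).  The duality lemmas prove Dd L 0 = Ff L N.

-- later occurrences of L[i]
def occAfter (L : List Char) (i : Nat) : List Nat :=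
  (List.range L.length).filter (fun j => decide (i < j) && (L[j]? == L[i]?))

def Dd (L : List Char) (i : Nat) : Int :=
  if h : i < L.length then
    (occAfter L i).attach.foldl (fun acc jp => min acc (Dd L (jp.1 + 1)))
      (1 + Dd L (i + 1))
  else 0
termination_by L.length - i
decreasing_by
  · have hm := jp.2
    simp only [occAfter, List.mem_filter, List.mem_range, Bool.and_eq_true,
      decide_eq_true_eq] at hm
    omega
  · omega

def Ff (L : List Char) : Nat → Int
  | 0 => 0
  | n + 1 =>
    (((List.range n).filter (fun i => L[i]? == L[n]?)).attach).foldl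
      (fun acc ip => min acc (Ff L ip.1)) (Ff L n + 1)
termination_by n => n
decreasing_by
  · have hm := ip.2
    simp only [List.mem_filter, List.mem_range] at hm
    omega
  · omega

-- first occurrence of c at an index ≥ k
def nxtS (L : List Char) (k : Nat) (c : Char) : Option Nat :=
  (List.range' k (L.length - k)).find? (fun j => L[j]? == some c)

lemma nxtS_some {L : List Char} {k : Nat} {c : Char} {j : Nat}
    (h : nxtS L k c = some j) : k ≤ j ∧ j < L.length ∧ L[j]? = some c := by
  have hm := List.mem_of_find?_eq_some h
  have hb := List.mem_range'_1.mp hm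
  have hp := List.find?_some h
  simp only [beq_iff_eq] at hp
  exact ⟨hb.1, by omega, hp⟩

def DSd (L : List Char) (i : Nat) : Int :=
  match h : nxtS L (i + 1) ((L[i]?).getD ' ') with
  | none => (L.length : Int) - (i : Int)
  | some j => min (Dd L (j + 1)) (DSd L j)
termination_by L.length - i
decreasing_by
  have := nxtS_some h
  omega

-- B's per-character dict value: minimum of Ff over earlier occurrences of c
def gS (L : List Char) : Nat → Char → Option Int
  | 0, _ => none
  | j + 1, c =>
    if L[j]? = some c then
      some (match gS L j c with | none => Ff L j | some v => min v (Ff L j))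
    else gS L j c

-- fold-of-mins toolbox (shape shared by Dd and Ff)
lemma foldlMin_le_init {α : Type} (l : List α) (g : α → Int) (b : Int) :
    l.foldl (fun a x => min a (g x)) b ≤ b := by
  induction l generalizing b with
  | nil => simp
  | cons y l ih => exact le_trans (ih _) (min_le_left _ _)

lemma foldlMin_le_mem {α : Type} (l : List α) (g : α → Int) :
    ∀ {x : α}, x ∈ l → ∀ b : Int, l.foldl (fun a x => min a (g x)) b ≤ g x := by
  induction l with
  | nil => intro x hx; cases hx
  | cons y l ih =>
    intro x hx b
    simp only [List.foldl_cons]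
    rcases List.mem_cons.mp hx with h | h
    · subst h; exact le_trans (foldlMin_le_init _ _ _) (min_le_right _ _)
    · exact ih h _

lemma foldlMin_attach {α : Type} (l : List α) (g : α → Int) (b : Int) :
    l.attach.foldl (fun acc xp => min acc (g xp.1)) b =
      l.foldl (fun acc x => min acc (g x)) b :=
  List.foldl_attach (f := fun acc x => min acc (g x))

lemma foldlMin_cases {α : Type} (l : List α) (g : α → Int) (b : Int) :
    l.foldl (fun a x => min a (g x)) b = b ∨
      ∃ x ∈ l, l.foldl (fun a x => min a (g x)) b = g x := by
  induction l generalizing b with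
  | nil => exact Or.inl rfl
  | cons y l ih =>
    rcases ih (min b (g y)) with h | ⟨x, hx, h⟩
    · rcases min_cases b (g y) with ⟨he, _⟩ | ⟨he, _⟩
      · exact Or.inl (by simpa [he] using h)
      · exact Or.inr ⟨y, List.mem_cons_self .., by simpa [he] using h⟩
    · exact Or.inr ⟨x, List.mem_cons_of_mem _ hx, h⟩

-- unfolding Dd through foldl_attach
lemma Dd_eq (L : List Char) (i : Nat) (h : i < L.length) :
    Dd L i = (occAfter L i).foldl (fun acc j => min acc (Dd L (j + 1)))
      (1 + Dd L (i + 1)) := by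
  rw [Dd]
  simp only [h, dite_true]
  exact foldlMin_attach (occAfter L i) (fun j => Dd L (j + 1)) (1 + Dd L (i + 1))

lemma mem_occAfter {L : List Char} {i j : Nat} :
    j ∈ occAfter L i ↔ i < j ∧ j < L.length ∧ L[j]? = L[i]? := by
  simp only [occAfter, List.mem_filter, List.mem_range, Bool.and_eq_true,
    decide_eq_true_eq, beq_iff_eq]
  tauto

lemma Dd_stop (L : List Char) (i : Nat) (h : L.length ≤ i) : Dd L i = 0 := by
  rw [Dd]; simp [Nat.not_lt.mpr h]

lemma D_step (L : List Char) (i : Nat) (h : i < L.length) :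
    Dd L i ≤ 1 + Dd L (i + 1) := by
  rw [Dd_eq L i h]; exact foldlMin_le_init _ _ _

lemma D_edge {L : List Char} {i j : Nat} (hij : i < j) (hj : j < L.length)
    (hc : L[j]? = L[i]?) : Dd L i ≤ Dd L (j + 1) := by
  rw [Dd_eq L i (lt_trans hij hj)]
  exact foldlMin_le_mem _ _ (mem_occAfter.mpr ⟨hij, hj, hc⟩) _

lemma D_cases (L : List Char) (i : Nat) (h : i < L.length) :
    Dd L i = 1 + Dd L (i + 1) ∨
      ∃ j, i < j ∧ j < L.length ∧ L[j]? = L[i]? ∧ Dd L i = Dd L (j + 1) := by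
  rw [Dd_eq L i h]
  rcases foldlMin_cases (occAfter L i) (fun j => Dd L (j + 1)) (1 + Dd L (i + 1)) with
    he | ⟨j, hj, he⟩
  · exact Or.inl he
  · obtain ⟨h1, h2, h3⟩ := mem_occAfter.mp hj
    exact Or.inr ⟨j, h1, h2, h3, he⟩

lemma D_linear (L : List Char) : ∀ d i, L.length - i = d → i ≤ L.length →
    Dd L i ≤ (L.length : Int) - (i : Nat) := by
  intro d
  induction d with
  | zero =>
    intro i hd hi
    have : i = L.length := by omega
    subst this
    simp [Dd_stop L _ le_rfl]
  | succ d ih =>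
    intro i hd hi
    have hlt : i < L.length := by omega
    have h1 := D_step L i hlt
    have h2 := ih (i + 1) (by omega) (by omega)
    push_cast at h2 ⊢
    omega

lemma F_step (L : List Char) (n : Nat) : Ff L (n + 1) ≤ Ff L n + 1 := by
  rw [Ff]
  rw [foldlMin_attach]
  exact foldlMin_le_init _ _ _

lemma F_edge {L : List Char} {i n : Nat} (hin : i < n) (hc : L[i]? = L[n]?) :
    Ff L (n + 1) ≤ Ff L i := by
  rw [Ff]
  rw [foldlMin_attach]
  refine foldlMin_le_mem _ _ ?_ _
  simp only [List.mem_filter, List.mem_range, beq_iff_eq]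
  exact ⟨hin, hc⟩

lemma F_cases (L : List Char) (n : Nat) :
    Ff L (n + 1) = Ff L n + 1 ∨
      ∃ i, i < n ∧ L[i]? = L[n]? ∧ Ff L (n + 1) = Ff L i := by
  rw [Ff, foldlMin_attach]
  rcases foldlMin_cases ((List.range n).filter (fun i => L[i]? == L[n]?))
      (fun i => Ff L i) (Ff L n + 1) with he | ⟨i, hi, he⟩
  · exact Or.inl he
  · simp only [List.mem_filter, List.mem_range, beq_iff_eq] at hi
    exact Or.inr ⟨i, hi.1, hi.2, he⟩

-- ===== duality: forward and backward distances meet =====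
lemma dual_A (L : List Char) : ∀ n, n ≤ L.length → Dd L 0 ≤ Ff L n + Dd L n := by
  intro n
  induction n using Nat.strong_induction_on with
  | _ n ih =>
    match n with
    | 0 => intro _; simp [Ff]
    | m + 1 =>
      intro hn
      have hm : m < L.length := by omega
      rcases F_cases L m with he | ⟨i, him, hc, he⟩
      · have h1 := ih m (by omega) (by omega)
        have h2 := D_step L m hm
        rw [he]; omega
      · have h1 := ih i (by omega) (by omega)
        have h2 := D_edge him hm hc.symm
        rw [he]; omega

lemma dual_B (L : List Char) : ∀ d i, L.length - i = d → i ≤ L.length →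
    Ff L L.length ≤ Ff L i + Dd L i := by
  intro d
  induction d using Nat.strong_induction_on with
  | _ d ih =>
    intro i hd hi
    by_cases hiN : i < L.length
    · rcases D_cases L i hiN with he | ⟨j, hij, hj, hc, he⟩
      · have h1 := ih (L.length - (i + 1)) (by omega) (i + 1) rfl (by omega)
        have h2 := F_step L i
        rw [he]; omega
      · have h1 := ih (L.length - (j + 1)) (by omega) (j + 1) rfl (by omega)
        have h2 := F_edge hij hc.symm
        rw [he]; omega
    · have : i = L.length := by omega
      subst this
      simp [Dd_stop L _ le_rfl]

lemma D0_eq_FN (L : List Char) : Dd L 0 = Ff L L.length := by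
  have h1 := dual_A L L.length le_rfl
  have h2 := dual_B L (L.length - 0) 0 rfl (by omega)
  rw [Dd_stop L _ le_rfl] at h1
  simp only [Ff] at h2
  omega

-- ===== DSd is what A's dps recurrence computes, and it is redundant =====
lemma nxtS_ge (L : List Char) (k : Nat) (c : Char) (h : L.length ≤ k) :
    nxtS L k c = none := by
  simp [nxtS, Nat.sub_eq_zero_of_le h]

lemma nxtS_lt (L : List Char) (k : Nat) (c : Char) (h : k < L.length) :
    nxtS L k c = if L[k]? = some c then some k else nxtS L (k + 1) c := by
  have hs : L.length - k = (L.length - (k + 1)) + 1 := by omega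
  rw [nxtS, hs, List.range'_succ]
  by_cases hc : L[k]? = some c <;> simp [hc, nxtS]

lemma DSd_none {L : List Char} {i : Nat}
    (h : nxtS L (i + 1) ((L[i]?).getD ' ') = none) :
    DSd L i = (L.length : Int) - (i : Nat) := by
  rw [DSd]; split <;> simp_all

lemma DSd_some {L : List Char} {i j : Nat}
    (h : nxtS L (i + 1) ((L[i]?).getD ' ') = some j) :
    DSd L i = min (Dd L (j + 1)) (DSd L j) := by
  rw [DSd]; split <;> simp_all

lemma nxtS_le {L : List Char} {c : Char} : ∀ d k j, j - k = d → k ≤ j →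
    j < L.length → L[j]? = some c → ∃ j0, nxtS L k c = some j0 ∧ j0 ≤ j := by
  intro d
  induction d using Nat.strong_induction_on with
  | _ d ih =>
    intro k j hd hk hj hcj
    have hkN : k < L.length := by omega
    rw [nxtS_lt L k c hkN]
    by_cases hck : L[k]? = some c
    · exact ⟨k, by simp [hck], hk⟩
    · have hkj : k ≠ j := fun h => hck (h ▸ hcj)
      obtain ⟨j0, h1, h2⟩ := ih (j - (k + 1)) (by omega) (k + 1) j rfl (by omega) hj hcj
      exact ⟨j0, by simp [hck, h1], h2⟩

-- getD ' ' of the scrutinised char, in the common in-range case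
lemma getD_char {L : List Char} {i : Nat} (h : i < L.length) :
    (L[i]?).getD ' ' = L[i] := by
  simp [List.getElem?_eq_getElem h]

lemma D_le_DS_aux (L : List Char) : ∀ d j, L.length - j = d → j < L.length →
    ∀ i, i < j → L[j]? = L[i]? → Dd L i ≤ DSd L j := by
  intro d
  induction d using Nat.strong_induction_on with
  | _ d ih =>
    intro j hd hj i hij hc
    have hchar : (some L[j] : Option Char) = L[i]? := by
      rw [← hc]; simp [List.getElem?_eq_getElem hj]
    cases hn : nxtS L (j + 1) ((L[j]?).getD ' ') with
    | none =>
      rw [DSd_none hn]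
      have h1 := D_edge hij hj hc
      have h2 := D_linear L (L.length - (j + 1)) (j + 1) rfl (by omega)
      push_cast at h2 ⊢
      omega
    | some j' =>
      rw [DSd_some hn]
      obtain ⟨hk1, hk2, hk3⟩ := nxtS_some hn
      rw [getD_char hj] at hk3
      have hcj' : L[j']? = L[i]? := by rw [hk3]; exact hchar
      refine le_min (D_edge (by omega) hk2 hcj') ?_
      exact ih (L.length - j') (by omega) j' rfl hk2 i (by omega) hcj'

lemma D_le_DS (L : List Char) (i : Nat) (h : i < L.length) : Dd L i ≤ DSd L i := by
  cases hn : nxtS L (i + 1) ((L[i]?).getD ' ') with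
  | none =>
    rw [DSd_none hn]
    exact D_linear L (L.length - i) i rfl (by omega)
  | some j =>
    rw [DSd_some hn]
    obtain ⟨hk1, hk2, hk3⟩ := nxtS_some hn
    rw [getD_char h] at hk3
    have hcj : L[j]? = L[i]? := by rw [hk3]; simp [List.getElem?_eq_getElem h]
    exact le_min (D_edge (by omega) hk2 hcj)
      (D_le_DS_aux L (L.length - j) j rfl hk2 i (by omega) hcj)

lemma DS_le_occ (L : List Char) : ∀ d i j, j - i = d → i < j → j < L.length →
    L[j]? = L[i]? → DSd L i ≤ Dd L (j + 1) := by
  intro d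
  induction d using Nat.strong_induction_on with
  | _ d ih =>
    intro i j hd hij hj hc
    have hi : i < L.length := by omega
    have hcj : L[j]? = some L[i] := by rw [hc]; simp [List.getElem?_eq_getElem hi]
    obtain ⟨j0, h1, h2⟩ := nxtS_le (L := L) (c := L[i]) (j - (i + 1)) (i + 1) j rfl
      (by omega) hj hcj
    have h1' : nxtS L (i + 1) ((L[i]?).getD ' ') = some j0 := by
      rwa [getD_char hi]
    obtain ⟨hb1, hb2, hb3⟩ := nxtS_some h1'
    rw [getD_char hi] at hb3
    rw [DSd_some h1']
    rcases eq_or_lt_of_le h2 with he | hlt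
    · subst he; exact min_le_left _ _
    · refine le_trans (min_le_right _ _) ?_
      exact ih (j - j0) (by omega) j0 j rfl hlt hj
        (by rw [hcj, hb3])

-- A's fused recurrence is the distance recurrence
lemma D_char (L : List Char) (i : Nat) (h : i < L.length) :
    Dd L i = min (1 + Dd L (i + 1)) (DSd L i) := by
  refine le_antisymm (le_min (D_step L i h) (D_le_DS L i h)) ?_
  rcases D_cases L i h with he | ⟨j, h1, h2, h3, he⟩
  · rw [he]; exact min_le_left _ _
  · rw [he]
    exact le_trans (min_le_right _ _) (DS_le_occ L (j - i) i j rfl h1 h2 h3)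

-- ===== A's loop computes Dd/DSd =====
lemma solGetI_of_getElem? {xs : List (Option Int)} {k : Nat} {v : Int}
    (h : xs[k]? = some (some v)) : solGetI xs (k : Int) = v := by
  simp [solGetI, PySem.List.pyGetD_natCast, List.getD, h]

lemma solSetD_natCast (xs : List (Option Int)) (k : Nat) (h : k < xs.length) (v : Option Int) :
    PySem.List.pySetD xs (k : Int) v = xs.set k v := by
  simp [PySem.List.pySetD, PySem.List.pySet?, PySem.List.pyIdx?, h]

def AInv (L : List Char) (k : Nat)
    (nxt : PySem.Dict Char Int) (dpl dpsl : List (Option Int)) : Prop :=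
  dpl.length = L.length + 1 ∧ dpsl.length = L.length + 1 ∧ k ≤ L.length ∧
  (∀ m : Nat, k ≤ m → m ≤ L.length →
    dpl[m]? = some (some (Dd L m)) ∧ dpsl[m]? = some (some (DSd L m))) ∧
  (∀ c : Char, nxt.get? c = (nxtS L k c).map (fun j => (j : Int)))

lemma DSd_len (L : List Char) : DSd L L.length = 0 := by
  rw [DSd_none (nxtS_ge L _ _ (by omega))]
  simp

lemma AStep (S : String) (k : Nat) (hk : k < S.toList.length)
    (nxt : PySem.Dict Char Int) (dpl dpsl : List (Option Int))
    (h : AInv S.toList (k + 1) nxt dpl dpsl) :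
    AInv S.toList k
      (solStepA S (S.toList.length : Int) (nxt, dpl, dpsl) (k : Int)).1
      (solStepA S (S.toList.length : Int) (nxt, dpl, dpsl) (k : Int)).2.1
      (solStepA S (S.toList.length : Int) (nxt, dpl, dpsl) (k : Int)).2.2 := by
  obtain ⟨hl1, hl2, hkN, hcell, hdict⟩ := h
  set L := S.toList with hL
  obtain ⟨ck, hck⟩ : ∃ c, L[k]? = some c := ⟨L[k], List.getElem?_eq_getElem hk⟩
  have hk1 : k < dpl.length := by omega
  have hk2 : k < dpsl.length := by omega
  have hchar : (PySem.Str.pyGet? S (k : Int)).getD ' ' = ck := by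
    rw [PySem.Str.pyGet?_natCast]
    show (L[k]?).getD ' ' = ck
    rw [hck]
    rfl
  have hcast1 : (k : Int) + 1 = ((k + 1 : Nat) : Int) := by push_cast; ring
  have hDSk : nxtS L (k + 1) ((L[k]?).getD ' ') = nxtS L (k + 1) ck := by
    rw [hck]
    rfl
  have hdictn : ∀ c' : Char, ck ≠ c' →
      ((nxt.insert ck (k : Int)).get? c' = (nxtS L k c').map (fun j => (j : Int))) := by
    intro c' hcc
    rw [PySem.Dict.get?_insert_of_ne _ _ (fun he => hcc he.symm), hdict c']
    rw [nxtS_lt L k _ hk]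
    have : ¬ (L[k]? = some c') := by rw [hck]; simpa using hcc
    simp [this]
  have hdicts : (nxt.insert ck (k : Int)).get? ck = (nxtS L k ck).map (fun j => (j : Int)) := by
    rw [PySem.Dict.get?_insert]
    rw [nxtS_lt L k _ hk, hck]
    simp
  cases hn : nxtS L (k + 1) ck with
  | some j0 =>
    have hcon : nxt.contains ck = true := by
      by_contra hcf
      have hno : nxt.get? ck = none := by
        rw [PySem.Dict.get?_eq_none_iff_contains]; simpa using hcf
      rw [hdict ck, hn] at hno
      simp at hno
    obtain ⟨hb1, hb2, hb3⟩ := nxtS_some hn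
    have hgetj : nxt.getD ck 0 = ((j0 : Nat) : Int) := by
      rw [PySem.Dict.getD_eq_get?_getD, hdict ck, hn]; rfl
    have hcastj : ((j0 : Nat) : Int) + 1 = ((j0 + 1 : Nat) : Int) := by push_cast; ring
    simp only [solStepA, hchar, hcon, if_true, hgetj]
    rw [solSetD_natCast dpsl k hk2]
    rw [hcastj, solGetI_of_getElem? (hcell (j0 + 1) (by omega) (by omega)).1]
    rw [solGetI_of_getElem? (show (dpsl.set k (some ((L.length : Int) - (k : Int))))[j0]? =
        some (some (DSd L j0)) by
      rw [List.getElem?_set_ne (by omega)]; exact (hcell j0 (by omega) (by omega)).2)]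
    rw [solSetD_natCast (dpsl.set k _) k (by simpa using hk2)]
    have hDS : min (Dd L (j0 + 1)) (DSd L j0) = DSd L k := by
      rw [DSd_some (hDSk.trans hn)]
    rw [hDS]
    rw [solGetI_of_getElem? (show ((dpsl.set k (some ((L.length : Int) - (k : Int)))).set k
        (some (DSd L k)))[k]? = some (some (DSd L k)) by
      rw [List.getElem?_set_self (by simpa using hk2)])]
    rw [hcast1, solGetI_of_getElem? (hcell (k + 1) le_rfl (by omega)).1]
    rw [solSetD_natCast dpl k hk1]
    have hD : min (1 + Dd L (k + 1)) (DSd L k) = Dd L k := (D_char L k hk).symm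
    rw [hD]
    refine ⟨by simpa using hl1, by simpa using hl2, by omega, ?_, ?_⟩
    · intro m hm1 hm2
      rcases eq_or_lt_of_le hm1 with he | hlt
      · subst he
        constructor
        · rw [List.getElem?_set_self (by simpa using hk1)]
        · rw [List.getElem?_set_self (by simpa using hk2)]
      · constructor
        · rw [List.getElem?_set_ne (by omega)]; exact (hcell m (by omega) hm2).1
        · rw [List.getElem?_set_ne (by omega), List.getElem?_set_ne (by omega)]
          exact (hcell m (by omega) hm2).2
    · intro c'
      by_cases hcc : ck = c'
      · subst hcc; exact hdicts
      · exact hdictn c' hcc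
  | none =>
    have hcon : nxt.contains ck = false := by
      have hno : nxt.get? ck = none := by rw [hdict ck, hn]; rfl
      rw [PySem.Dict.get?_eq_none_iff_contains] at hno
      exact hno
    simp only [solStepA, hchar, hcon, Bool.false_eq_true, if_false]
    rw [solSetD_natCast dpsl k hk2]
    have hDS : (L.length : Int) - (k : Int) = DSd L k := by
      rw [DSd_none (hDSk.trans hn)]
    rw [hDS]
    rw [solGetI_of_getElem? (show (dpsl.set k (some (DSd L k)))[k]? =
        some (some (DSd L k)) by rw [List.getElem?_set_self (by simpa using hk2)])]
    rw [hcast1, solGetI_of_getElem? (hcell (k + 1) le_rfl (by omega)).1]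
    rw [solSetD_natCast dpl k hk1]
    have hD : min (1 + Dd L (k + 1)) (DSd L k) = Dd L k := (D_char L k hk).symm
    rw [hD]
    refine ⟨by simpa using hl1, by simpa using hl2, by omega, ?_, ?_⟩
    · intro m hm1 hm2
      rcases eq_or_lt_of_le hm1 with he | hlt
      · subst he
        constructor
        · rw [List.getElem?_set_self (by simpa using hk1)]
        · rw [List.getElem?_set_self (by simpa using hk2)]
      · constructor
        · rw [List.getElem?_set_ne (by omega)]; exact (hcell m (by omega) hm2).1
        · rw [List.getElem?_set_ne (by omega)]; exact (hcell m (by omega) hm2).2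
    · intro c'
      by_cases hcc : ck = c'
      · subst hcc; exact hdicts
      · exact hdictn c' hcc

lemma ALoop (S : String) : ∀ k, k ≤ S.toList.length →
    ∀ (nxt : PySem.Dict Char Int) (dpl dpsl : List (Option Int)),
    AInv S.toList k nxt dpl dpsl →
    AInv S.toList 0
      (((PySem.List.pyRange ((k : Int) - 1) (-1) (-1)).foldl
        (solStepA S (S.toList.length : Int)) (nxt, dpl, dpsl))).1
      (((PySem.List.pyRange ((k : Int) - 1) (-1) (-1)).foldl
        (solStepA S (S.toList.length : Int)) (nxt, dpl, dpsl))).2.1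
      (((PySem.List.pyRange ((k : Int) - 1) (-1) (-1)).foldl
        (solStepA S (S.toList.length : Int)) (nxt, dpl, dpsl))).2.2 := by
  intro k
  induction k with
  | zero =>
    intro _ nxt dpl dpsl h
    rw [PySem.List.pyRange_neg_one_eq_nil (by norm_num)]
    simpa using h
  | succ k ih =>
    intro hk nxt dpl dpsl h
    have hstep := AStep S k (by omega) nxt dpl dpsl h
    have hr : ((k + 1 : Nat) : Int) - 1 = (k : Int) := by push_cast; ring
    rw [hr, PySem.List.pyRange_neg_one_cons (by omega)]
    simp only [List.foldl_cons]
    exact ih (by omega) _ _ _ hstep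

lemma solution_eq_Dd (S : String) : solution S = Dd S.toList 0 := by
  unfold solution
  simp only [PySem.Str.len_eq]
  set L := S.toList with hL
  set Nn := L.length with hNn
  have hinit : PySem.List.pySetD (PySem.List.pyRepeat [(none : Option Int)] ((Nn : Int) + 1))
      (Nn : Int) (some 0) = (List.replicate (Nn + 1) (none : Option Int)).set Nn (some 0) := by
    rw [show ((Nn : Int) + 1) = ((Nn + 1 : Nat) : Int) by push_cast; ring]
    rw [PySem.List.pyRepeat_singleton]
    rw [show ((((Nn + 1 : Nat) : Int)).toNat) = Nn + 1 from Int.toNat_natCast _]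
    rw [solSetD_natCast _ Nn (by simp)]
  have hbase : AInv L Nn PySem.Dict.empty
      ((List.replicate (Nn + 1) (none : Option Int)).set Nn (some 0))
      ((List.replicate (Nn + 1) (none : Option Int)).set Nn (some 0)) := by
    refine ⟨by simp [hNn], by simp [hNn], le_rfl, ?_, ?_⟩
    · intro m hm1 hm2
      have : m = Nn := by omega
      subst this
      rw [List.getElem?_set_self (by simp)]
      rw [Dd_stop L Nn le_rfl, DSd_len]
      exact ⟨rfl, rfl⟩
    · intro c
      rw [PySem.Dict.get?_empty, nxtS_ge L Nn c le_rfl]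
      rfl
  have hfin := ALoop S Nn le_rfl PySem.Dict.empty _ _ hbase
  rw [hinit]
  have h0 := (hfin.2.2.2.1 0 (le_refl 0) (by omega)).1
  have := solGetI_of_getElem? h0
  rw [Nat.cast_zero] at this
  rw [this]

-- ===== B's loop computes Ff =====
lemma gS_foldl (L : List Char) (c : Char) : ∀ (j : Nat) (b : Int),
    ((List.range j).filter (fun i => L[i]? == some c)).foldl
      (fun acc i => min acc (Ff L i)) b =
    match gS L j c with | none => b | some v => min b v := by
  intro j
  induction j with
  | zero => intro b; simp [gS]
  | succ j ih =>
    intro b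
    rw [List.range_succ, List.filter_append]
    by_cases hc : L[j]? = some c
    · simp only [List.filter_cons, List.filter_nil, hc, beq_self_eq_true, if_true]
      rw [List.foldl_append, ih b]
      simp only [gS, hc, if_true]
      cases hgs : gS L j c with
      | none => simp
      | some v => simp [min_assoc]
    · have hb : (L[j]? == some c) = false := by simp [hc]
      simp only [List.filter_cons, List.filter_nil, hb, Bool.false_eq_true, if_false,
        List.append_nil]
      rw [ih b]
      simp only [gS, hc, if_false]

lemma F_char (L : List Char) (j : Nat) {c : Char} (hc : L[j]? = some c) :
    Ff L (j + 1) = match gS L j c with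
      | none => Ff L j + 1
      | some v => min (Ff L j + 1) v := by
  rw [Ff, foldlMin_attach]
  simp only [hc]
  exact gS_foldl L c j _

def BInvP (L : List Char) (j : Nat) (st : Int × PySem.Dict Char Int) : Prop :=
  st.1 = Ff L j ∧ ∀ c, st.2.get? c = gS L j c

lemma BStep (S : String) (j : Nat) (hj : j < S.toList.length)
    (st : Int × PySem.Dict Char Int) (h : BInvP S.toList j st) :
    BInvP S.toList (j + 1) (solStepB S st (j : Int)) := by
  obtain ⟨f, g⟩ := st
  obtain ⟨hf, hg⟩ := h
  set L := S.toList with hL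
  simp only at hf
  obtain ⟨cj, hcj⟩ : ∃ c, L[j]? = some c := ⟨L[j], List.getElem?_eq_getElem hj⟩
  have hchar : (PySem.Str.pyGet? S (j : Int)).getD ' ' = cj := by
    rw [PySem.Str.pyGet?_natCast]
    show (L[j]?).getD ' ' = cj
    rw [hcj]
    rfl
  have hgnew : ∀ w : Int, ∀ c' : Char, cj ≠ c' →
      (g.insert cj w).get? c' = gS L (j + 1) c' := by
    intro w c' hcc
    rw [PySem.Dict.get?_insert_of_ne _ _ (fun he => hcc he.symm), hg c']
    have : ¬ (L[j]? = some c') := by rw [hcj]; simpa using hcc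
    simp only [gS, this, if_false]
  cases hgs : gS L j cj with
  | some v =>
    have hget : g.get? cj = some v := by rw [hg, hgs]
    have hcon : g.contains cj = true := by
      by_contra hcf
      have hno : g.get? cj = none := by
        rw [PySem.Dict.get?_eq_none_iff_contains]; simpa using hcf
      rw [hget] at hno; cases hno
    have hgetD : g.getD cj 0 = v := by
      rw [PySem.Dict.getD_eq_get?_getD, hget]; rfl
    simp only [solStepB, hchar, hcon, if_true, hgetD]
    constructor
    · simp only [hf]
      rw [F_char L j hcj, hgs]
    · intro c'
      by_cases hcc : cj = c'
      · subst hcc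
        rw [PySem.Dict.get?_insert]
        simp only [gS, hcj, if_true, hgs, hf]
      · exact hgnew _ c' hcc
  | none =>
    have hget : g.get? cj = none := by rw [hg, hgs]
    have hcon : g.contains cj = false := by
      rw [← PySem.Dict.get?_eq_none_iff_contains]; exact hget
    simp only [solStepB, hchar, hcon, Bool.false_eq_true, if_false]
    constructor
    · simp only [hf]
      rw [F_char L j hcj, hgs]
    · intro c'
      by_cases hcc : cj = c'
      · subst hcc
        rw [PySem.Dict.get?_insert]
        simp only [gS, hcj, if_true, hgs, hf]
      · exact hgnew _ c' hcc

lemma BLoop (S : String) : ∀ j, j ≤ S.toList.length →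
    BInvP S.toList j
      ((PySem.List.pyRange 0 (j : Int) 1).foldl (solStepB S) (0, PySem.Dict.empty)) := by
  intro j
  induction j with
  | zero =>
    intro _
    rw [PySem.List.pyRange_one_eq_nil (by norm_num)]
    refine ⟨by simp [Ff], ?_⟩
    intro c
    simp only [List.foldl_nil]
    rw [PySem.Dict.get?_empty]
    rfl
  | succ j ih =>
    intro hj
    have hr : ((j + 1 : Nat) : Int) = (j : Int) + 1 := by push_cast; ring
    rw [hr, PySem.List.pyRange_one_succ_right (by positivity)]
    rw [List.foldl_append]
    simp only [List.foldl_cons, List.foldl_nil]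
    exact BStep S j (by omega) _ (ih (by omega))

lemma solution_alt_eq_Ff (S : String) : solution_alt S = Ff S.toList S.toList.length := by
  unfold solution_alt
  simp only [PySem.Str.len_eq]
  exact (BLoop S S.toList.length le_rfl).1

-- ===== VERDICT (by name: the statement is the Claim_ definition above) =====
theorem solution_spec : Claim_equal_solution := by
  intro S _
  unfold Spec_solution
  rw [solution_eq_Dd, solution_alt_eq_Ff, D0_eq_FN]
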